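-- pv_equiv track=rewrite | github.com/juweriya1/ai-document-processing | src/backend/utils/currency.py | _resolve_grouping
-- ===== SOURCE A (Python) =====
-- class InvalidCurrencyError(ValueError):
--     pass
--
-- def _resolve_grouping(raw: str) -> str:
--     """Validate Western thousands-separator grouping (groups of 3 digits)
--     and return the digits-only form. Raises on malformed grouping like
--     `1,50,000` (Indian lakh-style — not supported)."""
--     if "," not in raw:
--         return raw
--
--     if "." in raw:
--         int_part, _, frac_part = raw.rpartition(".")
--     else:
--         int_part, frac_part = raw, ""
--
--     if "," not in int_part:
--         return raw
--
--     groups = int_part.split(",")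
--     head = groups[0]
--     tail = groups[1:]
--
--     if not head or not all(g.isdigit() for g in tail) or not head.lstrip("-").isdigit():
--         raise InvalidCurrencyError(f"Unparseable currency grouping: {raw!r}")
--
--     # Western convention: every group after the head is exactly 3 digits.
--     for g in tail:
--         if len(g) != 3:
--             raise InvalidCurrencyError(f"Invalid group length: {raw!r}")
--
--     clean_int = head + "".join(tail)
--     return clean_int + (f".{frac_part}" if frac_part else "")
-- ===== SOURCE B (Python) =====
-- import re
--
-- class InvalidCurrencyError(ValueError):
--     pass
--
-- _GROUPING_RE = re.compile(r"-?\d+(?:,\d{3})+")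
--
-- def _resolve_grouping(raw: str) -> str:
--     if "," not in raw:
--         return raw
--
--     if "." in raw:
--         int_part, _, frac_part = raw.rpartition(".")
--     else:
--         int_part, frac_part = raw, ""
--
--     if "," not in int_part:
--         return raw
--
--     if not _GROUPING_RE.fullmatch(int_part):
--         raise InvalidCurrencyError(f"Unparseable currency grouping: {raw!r}")
--
--     clean_int = int_part.replace(",", "")
--     return clean_int + (f".{frac_part}" if frac_part else "")
-- ===== Notes on version B (the rewrite author's own statement) =====
-- stated objective: idiomatic
-- what changed: The comma-split / all() / per-group length loop validation core is replaced by a single precompiled regex fullmatch of an optional minus sign, a digit run, then one-or-more 3-digit comma groups, with the separators then stripped by str.replace; Pre_ excludes the inputs on which A raises, and also comma-grouped integer parts whose head carries two or more leading minus signs, which A accepts only by accident of stripping all leading minuses before the digit test and on which B's regex raises.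
-- outside the precondition, e.g. on _resolve_grouping('--1,000'): A returns '--1000', B raises InvalidCurrencyError; on _resolve_grouping('---2,345'): A returns '---2345', B raises InvalidCurrencyError
import Mathlib
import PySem

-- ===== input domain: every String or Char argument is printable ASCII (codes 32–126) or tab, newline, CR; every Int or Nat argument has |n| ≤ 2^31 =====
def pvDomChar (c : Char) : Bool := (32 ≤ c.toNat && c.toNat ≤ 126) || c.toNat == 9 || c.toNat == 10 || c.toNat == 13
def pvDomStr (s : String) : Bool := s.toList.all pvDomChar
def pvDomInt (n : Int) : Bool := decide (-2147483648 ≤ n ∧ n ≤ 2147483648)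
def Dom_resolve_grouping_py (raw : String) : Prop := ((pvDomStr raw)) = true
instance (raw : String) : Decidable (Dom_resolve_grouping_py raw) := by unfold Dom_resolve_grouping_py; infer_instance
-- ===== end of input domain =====

-- B replaces A's split/all/loop group validation by a single regex-style sequential match
-- ('-?\d+(?:,\d{3})+') and a replace(",","") — more idiomatic, same behaviour, same cost.
-- On inputs outside Pre_ both programs raise InvalidCurrencyError, except multi-minus heads
-- (see the Pre_ comment), where A returns and B raises.

-- ===== PORT A =====
-- raw.rpartition("."): (part before the LAST '.', part after it); exact whenever '.' ∈ cs
-- (both Pythons call it only under that guard).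
def pvRPartitionDot (cs : List Char) : List Char × List Char :=
  let fr := (cs.reverse.takeWhile (fun c => c ≠ '.')).reverse
  (cs.take (cs.length - fr.length - 1), fr)

def resolve_grouping_py (raw : String) : String :=
  if PySem.Str.isIn "," raw = false then raw
  else
    let ip : List Char × List Char :=
      if PySem.Str.isIn "." raw then pvRPartitionDot raw.toList else (raw.toList, [])
    let int_part := ip.1
    let frac_part := ip.2
    if PySem.Chars.isIn [','] int_part = false then raw
    else
      let groups := PySem.Chars.splitOn int_part [',']
      let head := groups.headI        -- groups[0]; split never returns [], so indexing is safe
      let tail := groups.tail         -- groups[1:]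
      if head = [] ∨ ¬ (tail.all (fun g => PySem.Chars.strIsdigit g)) ∨
         ¬ PySem.Chars.strIsdigit (head.dropWhile (fun c => c = '-'))  -- head.lstrip("-").isdigit()
      then ""  -- raise InvalidCurrencyError (outside Pre_)
      else if ¬ (tail.all (fun g => g.length = 3))  -- the for-loop over tail raising on len(g) != 3
      then ""  -- raise InvalidCurrencyError (outside Pre_)
      else
        let clean_int := head ++ PySem.Chars.join [] tail
        String.ofList (clean_int ++ (if frac_part ≠ [] then '.' :: frac_part else []))

-- ===== PORT B =====
-- (?:,\d{3})+ anchored at the end of the string (regex \d on the ASCII domain = Char.isDigit).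
def pvMatchGroups : List Char → Bool
  | ',' :: a :: b :: c :: rest =>
      PySem.Chars.isdigit a && PySem.Chars.isdigit b && PySem.Chars.isdigit c &&
      (rest.isEmpty || pvMatchGroups rest)
  | _ => false

def resolve_grouping_py_alt (raw : String) : String :=
  if PySem.Str.isIn "," raw = false then raw
  else
    let ip : List Char × List Char :=
      if PySem.Str.isIn "." raw then pvRPartitionDot raw.toList else (raw.toList, [])
    let int_part := ip.1
    let frac_part := ip.2
    if PySem.Chars.isIn [','] int_part = false then raw
    else
      -- re.fullmatch(r'-?\d+(?:,\d{3})+', int_part): '-?' (one optional minus), then greedy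
      -- '\d+' (no backtracking is needed: the next token ',' is not a digit), then the
      -- 3-digit groups to the end.
      let t := if int_part.head? = some '-' then int_part.tail else int_part
      if (t.takeWhile PySem.Chars.isdigit ≠ []) ∧ pvMatchGroups (t.dropWhile PySem.Chars.isdigit) = true then
        let clean_int := PySem.Chars.replace int_part [','] []   -- int_part.replace(",", "")
        String.ofList (clean_int ++ (if frac_part ≠ [] then '.' :: frac_part else []))
      else ""  -- raise InvalidCurrencyError (outside Pre_)

-- ===== PRECONDITION & SPEC =====
-- Pre_ excludes the inputs on which A raises InvalidCurrencyError, and additionally the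
-- comma-grouped integer parts whose head starts with two or more minus signs: A accepts
-- those only by accident of stripping every leading minus before the digit test, and B's
-- regex (one optional minus) raises there.
def Pre_resolve_grouping_py (raw : String) : Prop :=
  PySem.Str.isIn "," raw = false ∨
  (let int_part := (if PySem.Str.isIn "." raw then pvRPartitionDot raw.toList
                    else (raw.toList, [])).1
   PySem.Chars.isIn [','] int_part = false ∨
   (let groups := PySem.Chars.splitOn int_part [',']
    groups.headI ≠ [] ∧
    groups.headI.take 2 ≠ ['-', '-'] ∧
    groups.tail.all (fun g => PySem.Chars.strIsdigit g) = true ∧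
    PySem.Chars.strIsdigit (groups.headI.dropWhile (fun c => c = '-')) = true ∧
    groups.tail.all (fun g => g.length = 3) = true))
instance (raw : String) : Decidable (Pre_resolve_grouping_py raw) := by
  unfold Pre_resolve_grouping_py; infer_instance

def pvWitness_resolve_grouping_py : String := "1,234,567.89"

def Spec_resolve_grouping_py (raw : String) (out : String) : Prop := out = resolve_grouping_py_alt raw
instance (raw : String) (out : String) : Decidable (Spec_resolve_grouping_py raw out) := by
  unfold Spec_resolve_grouping_py; infer_instance

-- ===== CLAIM (what is proved, stated in full; the proofs are below) =====
def Claim_equal_resolve_grouping_py : Prop := ∀ (raw : String), Dom_resolve_grouping_py raw → Pre_resolve_grouping_py raw → Spec_resolve_grouping_py raw (resolve_grouping_py raw)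

-- ===== LEMMAS AND PROOFS =====

-- A simple structural recursion that PySem.Chars.splitOn (single-char ',') computes.
def pvSp : List Char → List (List Char)
  | [] => [[]]
  | c :: cs => if c = ',' then [] :: pvSp cs
               else (c :: (pvSp cs).headI) :: (pvSp cs).tail

theorem pvSp_ne_nil (cs : List Char) : pvSp cs ≠ [] := by
  cases cs with
  | nil => simp [pvSp]
  | cons c cs => by_cases h : c = ',' <;> simp [pvSp, h]

theorem splitOn_go_comma (fuel : Nat) (l cur : List Char) (acc : List (List Char))
    (h : l.length ≤ fuel) :
    PySem.Chars.splitOn.go [','] fuel l cur acc =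
      acc.reverse ++ (cur.reverse ++ (pvSp l).headI) :: (pvSp l).tail := by
  induction fuel generalizing l cur acc with
  | zero =>
    have : l = [] := by cases l <;> simp_all
    subst this
    simp [PySem.Chars.splitOn.go, pvSp]
  | succ fuel ih =>
    cases l with
    | nil => simp [PySem.Chars.splitOn.go, pvSp]
    | cons c rest =>
      simp only [List.length_cons] at h
      by_cases hc : c = ','
      · subst hc
        have hpre : List.isPrefixOf [','] (',' :: rest) = true := by simp [List.isPrefixOf]
        rw [PySem.Chars.splitOn.go, if_pos hpre]
        simp only [List.length_singleton, List.drop_one, List.tail_cons]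
        rw [ih rest [] _ (by omega)]
        have hne := pvSp_ne_nil rest
        simp [pvSp]
        cases hsp : pvSp rest with
        | nil => exact absurd hsp hne
        | cons g gs => simp
      · have hpre : List.isPrefixOf [','] (c :: rest) = false := by
          simp [List.isPrefixOf]; exact fun h => absurd h.symm hc
        rw [PySem.Chars.splitOn.go, if_neg (by simp [hpre])]
        rw [ih rest (c :: cur) acc (by omega)]
        simp [pvSp, hc]

theorem splitOn_comma (cs : List Char) :
    PySem.Chars.splitOn cs [','] = (pvSp cs).headI :: (pvSp cs).tail := by
  show PySem.Chars.splitOn.go [','] (cs.length + 1) cs [] [] = _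
  rw [splitOn_go_comma _ _ _ _ (by omega)]
  simp

theorem replace_go_comma (fuel : Nat) (l acc : List Char) (h : l.length ≤ fuel) :
    PySem.Chars.replace.go [','] [] fuel l acc =
      acc.reverse ++ l.filter (fun c => c ≠ ',') := by
  induction fuel generalizing l acc with
  | zero =>
    have : l = [] := by cases l <;> simp_all
    subst this; simp [PySem.Chars.replace.go]
  | succ fuel ih =>
    cases l with
    | nil => simp [PySem.Chars.replace.go]
    | cons c rest =>
      simp only [List.length_cons] at h
      by_cases hc : c = ','
      · subst hc
        have hpre : List.isPrefixOf [','] (',' :: rest) = true := by simp [List.isPrefixOf]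
        rw [PySem.Chars.replace.go, if_pos hpre]
        simp only [List.length_singleton, List.drop_one, List.tail_cons, List.reverse_nil,
          List.nil_append]
        rw [ih rest acc (by omega)]
        simp
      · have hpre : List.isPrefixOf [','] (c :: rest) = false := by
          simp [List.isPrefixOf]; exact fun h => absurd h.symm hc
        rw [PySem.Chars.replace.go, if_neg (by simp [hpre])]
        rw [ih rest (c :: acc) (by omega)]
        simp [hc]

theorem replace_comma (cs : List Char) :
    PySem.Chars.replace cs [','] [] = cs.filter (fun c => c ≠ ',') := by
  show (if ([',' ] : List Char).isEmpty = true then _ else PySem.Chars.replace.go [','] [] cs.length cs []) = _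
  rw [if_neg (by simp)]
  rw [replace_go_comma _ _ _ (le_refl _)]
  simp

-- joinComma reassembles pvSp's pieces.
theorem pvSp_join (cs : List Char) :
    (pvSp cs).headI ++ ((pvSp cs).tail.map (fun g => ',' :: g)).flatten = cs := by
  induction cs with
  | nil => simp [pvSp]
  | cons c cs ih =>
    by_cases hc : c = ','
    · subst hc
      have hne := pvSp_ne_nil cs
      cases hsp : pvSp cs with
      | nil => exact absurd hsp hne
      | cons g gs =>
        simp [pvSp, hsp] at ih ⊢
        exact ih
    · simp [pvSp, hc] at ih ⊢
      exact ih

theorem pvSp_no_comma (cs : List Char) :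
    ',' ∉ (pvSp cs).headI ∧ ∀ g ∈ (pvSp cs).tail, ',' ∉ g := by
  induction cs with
  | nil => simp [pvSp]
  | cons c cs ih =>
    by_cases hc : c = ','
    · subst hc
      have hne := pvSp_ne_nil cs
      cases hsp : pvSp cs with
      | nil => exact absurd hsp hne
      | cons g gs =>
        rw [hsp] at ih
        simp [pvSp, hsp] at ih ⊢
        exact ⟨ih.1, ih.2⟩
    · simp [pvSp, hc] at ih ⊢
      exact ⟨⟨fun h => absurd h.symm hc, ih.1⟩, ih.2⟩

theorem pvSp_tail_ne_nil (cs : List Char) (h : ',' ∈ cs) : (pvSp cs).tail ≠ [] := by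
  intro htail
  have hj := pvSp_join cs
  rw [htail] at hj
  simp at hj
  rw [← hj] at h
  exact (pvSp_no_comma cs).1 h

theorem join_nil_flatten (gs : List (List Char)) : PySem.Chars.join [] gs = gs.flatten := by
  induction gs with
  | nil => simp [PySem.Chars.join_nil]
  | cons g gs ih =>
    cases gs with
    | nil => simp [PySem.Chars.join_singleton]
    | cons g' gs' => rw [PySem.Chars.join_cons_cons]; simp [ih]

-- every group is 3 digits ⇒ the matcher accepts the reassembled tail
theorem matchGroups_of_groups (gs : List (List Char)) (hne : gs ≠ [])
    (h : ∀ g ∈ gs, PySem.Chars.strIsdigit g = true ∧ g.length = 3) :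
    pvMatchGroups ((gs.map (fun g => ',' :: g)).flatten) = true := by
  induction gs with
  | nil => exact absurd rfl hne
  | cons g gs ih =>
    obtain ⟨hd, hl⟩ := h g (by simp)
    match g, hl with
    | [a, b, c], _ =>
      simp [PySem.Chars.strIsdigit] at hd
      obtain ⟨ha, hb, hcd⟩ := hd
      cases gs with
      | nil => simp [pvMatchGroups, ha, hb, hcd]
      | cons g' gs' =>
        have hrec := ih (by simp) (fun x hx => h x (by simp [hx]))
        simp only [List.map_cons, List.flatten_cons, List.cons_append] at hrec ⊢
        simp [pvMatchGroups, ha, hb, hcd, hrec]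

theorem filter_flat_comma (gs : List (List Char)) (h : ∀ g ∈ gs, ',' ∉ g) :
    ((gs.map (fun g => ',' :: g)).flatten).filter (fun c => c ≠ ',') = gs.flatten := by
  induction gs with
  | nil => simp
  | cons g gs ih =>
    simp only [List.map_cons, List.flatten_cons, List.filter_append, List.filter_cons]
    rw [ih (fun x hx => h x (by simp [hx])),
      List.filter_eq_self.2 (fun c hc => by simpa using ne_of_mem_of_not_mem hc (h g (by simp)))]
    simp

-- dropping the single optional leading '-' distributes over an append with nonempty head
theorem pvDropOneMinus_append (H F : List Char) (hh : H ≠ []) :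
    (if (H ++ F).head? = some '-' then (H ++ F).tail else H ++ F) =
      (if H.head? = some '-' then H.tail else H) ++ F := by
  cases H with
  | nil => exact absurd rfl hh
  | cons c rest =>
    by_cases hc : c = '-'
    · subst hc; simp
    · simp [hc]

-- ===== VERDICT (by name: the statement is the Claim_ definition above) =====
theorem resolve_grouping_py_spec : Claim_equal_resolve_grouping_py := by
  intro raw _hdom hpre
  unfold Spec_resolve_grouping_py
  unfold resolve_grouping_py resolve_grouping_py_alt
  by_cases h1 : PySem.Str.isIn "," raw = false
  · rw [if_pos h1, if_pos h1]
  · rw [if_neg h1, if_neg h1]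
    set ip := (if PySem.Str.isIn "." raw then pvRPartitionDot raw.toList
               else (raw.toList, [])) with hip
    by_cases h2 : PySem.Chars.isIn [','] ip.1 = false
    · rw [if_pos h2, if_pos h2]
    · rw [if_neg h2, if_neg h2]
      -- extract the validity facts from Pre_
      unfold Pre_resolve_grouping_py at hpre
      rw [← hip] at hpre
      obtain ⟨hh, hmm, hdig, hhead, hlen⟩ := (hpre.resolve_left h1).resolve_left h2
      rw [splitOn_comma ip.1] at hh hmm hdig hhead hlen ⊢
      simp only [List.headI_cons, List.tail_cons] at hh hmm hdig hhead hlen ⊢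
      -- A's two raise-guards are false
      rw [if_neg (by push Not; exact ⟨hh, by simp [hdig], by simp [hhead]⟩)]
      rw [if_neg (by simp [hlen])]
      -- the pieces
      have hmem : ',' ∈ ip.1 := by
        have ht : PySem.Chars.isIn [','] ip.1 = true := by
          cases hx : PySem.Chars.isIn [','] ip.1 <;> simp_all
        exact (List.singleton_infix_iff _ _).1 ((PySem.Chars.isIn_iff_infix _ _).1 ht)
      have hjoin := pvSp_join ip.1
      have hnc := pvSp_no_comma ip.1
      have htne := pvSp_tail_ne_nil ip.1 hmem
      obtain ⟨g0, gs0, hgt⟩ := List.exists_cons_of_ne_nil htne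
      have hd'props : (pvSp ip.1).headI.dropWhile (fun c => decide (c = '-')) ≠ [] ∧
          ∀ c ∈ (pvSp ip.1).headI.dropWhile (fun c => decide (c = '-')),
            PySem.Chars.isdigit c = true := by
        have h := hhead
        simp only [PySem.Chars.strIsdigit, Bool.and_eq_true, Bool.not_eq_true',
          List.isEmpty_eq_false_iff, List.all_eq_true] at h
        exact h
      -- the optional-single-minus drop of B equals A's dropWhile on the head:
      -- under Pre_ the head is an optional '-' followed by digits.
      have hheadshape : (pvSp ip.1).headI.dropWhile (fun c => decide (c = '-')) =
          (if (pvSp ip.1).headI.head? = some '-' then (pvSp ip.1).headI.tail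
           else (pvSp ip.1).headI) := by
        cases hH : (pvSp ip.1).headI with
        | nil => exact absurd hH hh
        | cons c rest =>
          by_cases hc : c = '-'
          · subst hc
            cases rest with
            | nil =>
              rw [hH] at hd'props
              simp [List.dropWhile] at hd'props
            | cons c2 rest2 =>
              have hc2 : c2 ≠ '-' := by
                intro hc2; subst hc2
                rw [hH] at hmm
                simp at hmm
              simp [List.dropWhile, hc2]
          · simp [List.dropWhile, hc]
      -- ip.1's head char is headI's head char (headI nonempty)
      have hip1head : ip.1.head? = (pvSp ip.1).headI.head? := by
        conv_lhs => rw [← hjoin]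
        cases hH : (pvSp ip.1).headI with
        | nil => exact absurd hH hh
        | cons c rest => simp
      -- B's t = ip.1 with the single optional leading minus dropped = dropWhile '-' on ip.1
      have hteq : (if ip.1.head? = some '-' then ip.1.tail else ip.1) =
          (pvSp ip.1).headI.dropWhile (fun c => decide (c = '-')) ++
            ((pvSp ip.1).tail.map (fun g => ',' :: g)).flatten := by
        have h := pvDropOneMinus_append ((pvSp ip.1).headI)
          (((pvSp ip.1).tail.map (fun g => ',' :: g)).flatten) hh
        rw [hjoin] at h
        rw [h, hheadshape]
      set t := (if ip.1.head? = some '-' then ip.1.tail else ip.1) with htdef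
      have hFcons : ((pvSp ip.1).tail.map (fun g => ',' :: g)).flatten =
          ',' :: (g0 ++ ((gs0.map (fun g => ',' :: g)).flatten)) := by
        rw [hgt]; simp
      have htake : t.takeWhile PySem.Chars.isdigit ≠ [] := by
        rw [hteq, List.takeWhile_append,
          if_pos (by rw [List.takeWhile_eq_self_iff.2 hd'props.2])]
        intro hx
        exact hd'props.1 (List.append_eq_nil_iff.1 hx).1
      have hdropdig : t.dropWhile PySem.Chars.isdigit =
          ((pvSp ip.1).tail.map (fun g => ',' :: g)).flatten := by
        rw [hteq, List.dropWhile_append,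
          if_pos (by simp only [List.isEmpty_iff, List.dropWhile_eq_nil_iff]
                     exact hd'props.2)]
        rw [hFcons]
        rw [List.dropWhile_cons_of_neg (by simp [PySem.Chars.isdigit])]
      have hmatch : pvMatchGroups (t.dropWhile PySem.Chars.isdigit) = true := by
        rw [hdropdig]
        refine matchGroups_of_groups _ htne (fun g hg => ⟨?_, ?_⟩)
        · exact List.all_eq_true.1 hdig g hg
        · simpa using List.all_eq_true.1 hlen g hg
      have hcond : t.takeWhile PySem.Chars.isdigit ≠ [] ∧
          pvMatchGroups (t.dropWhile PySem.Chars.isdigit) = true := ⟨htake, hmatch⟩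
      rw [if_pos hcond]
      -- the two clean integer parts agree
      have hclean : (pvSp ip.1).headI ++ PySem.Chars.join [] (pvSp ip.1).tail =
          PySem.Chars.replace ip.1 [','] [] := by
        rw [replace_comma, join_nil_flatten]
        conv_rhs => rw [← hjoin]
        rw [List.filter_append, List.filter_eq_self.2
          (fun c hc => by simpa using ne_of_mem_of_not_mem hc hnc.1)]
        congr 1
        exact (filter_flat_comma _ hnc.2).symm
      rw [← hclean, List.append_assoc]
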